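-- pv_equiv track=rewrite | github.com/deanwhitbread/xai-experiments | src/helpers.py | get_shortcut_key_str
-- ===== SOURCE A (Python) =====
-- def get_shortcut_key_str(word, key):
--     '''Return a string highlighting the shortcut key.
--
--     Arguments:
--         word: The word being highlighted.
--         key: The shortcut key in the word.
--     '''
--     output = ""
--     for letter in word:
--         if letter.lower() == key:
--             output = '(' + letter +')'
--         else:
--             output += letter
--
--     return output
-- ===== SOURCE B (Python) =====
-- def get_shortcut_key_str(word, key):
--     '''Return a string highlighting the shortcut key.'''
--     for i in range(len(word) - 1, -1, -1):
--         if word[i].lower() == key: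
--             return '(' + word[i] + ')' + word[i + 1:]
--     return word
-- ===== Notes on version B (the rewrite author's own statement) =====
-- stated objective: simpler
-- what changed: B scans from the right and returns at the first (i.e. last) match, splicing '(' + letter + ')' with the tail slice, instead of A's left-to-right rebuild with an accumulator that is reset on each match.
import Mathlib
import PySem

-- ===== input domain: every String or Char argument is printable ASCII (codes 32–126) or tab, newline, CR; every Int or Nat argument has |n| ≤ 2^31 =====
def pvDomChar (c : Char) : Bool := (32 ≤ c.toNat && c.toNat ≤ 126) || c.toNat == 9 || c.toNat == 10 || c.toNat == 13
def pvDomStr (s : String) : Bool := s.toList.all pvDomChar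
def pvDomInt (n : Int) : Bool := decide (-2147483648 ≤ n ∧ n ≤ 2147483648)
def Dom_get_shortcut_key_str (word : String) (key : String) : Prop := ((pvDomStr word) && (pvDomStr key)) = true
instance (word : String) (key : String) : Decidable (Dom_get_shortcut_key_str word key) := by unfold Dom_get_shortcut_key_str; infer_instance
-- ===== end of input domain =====

-- ===== PORT A =====
-- B changes the decomposition (right-to-left scan + splice instead of A's resetting
-- accumulator); same asymptotic cost, no speed claim.

-- letter.lower() == key for a one-character letter c (shared by both ports)
def pvLowEq (c : Char) (key : List Char) : Bool := PySem.Chars.lower [c] == key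

-- A: left-to-right loop; the accumulator is RESET to '(' ++ letter ++ ')' on a match,
-- otherwise the letter is appended.
def get_shortcut_key_str (word : String) (key : String) : String :=
  String.mk (word.toList.foldl
    (fun acc c => if pvLowEq c key.toList then '(' :: c :: [')'] else acc ++ [c]) [])

-- ===== PORT B =====
-- B: scan from the right (the recursive call inspects the tail first); on the first
-- match from the right return '(' ++ letter ++ ')' ++ tail, else the word unchanged.
def pvAltGo (key : List Char) : List Char → Option (List Char)
  | [] => none
  | c :: rest =>
    match pvAltGo key rest with
    | some s => some s
    | none => if pvLowEq c key then some ('(' :: c :: ')' :: rest) else none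

def get_shortcut_key_str_alt (word : String) (key : String) : String :=
  match pvAltGo key.toList word.toList with
  | some s => String.mk s
  | none => word

-- ===== PRECONDITION & SPEC =====
def Spec_get_shortcut_key_str (word : String) (key : String) (out : String) : Prop := out = get_shortcut_key_str_alt word key
instance (word : String) (key : String) (out : String) : Decidable (Spec_get_shortcut_key_str word key out) := by unfold Spec_get_shortcut_key_str; infer_instance

-- ===== CLAIM (what is proved, stated in full; the proofs are below) =====
def Claim_equal_get_shortcut_key_str : Prop := ∀ (word : String) (key : String), Dom_get_shortcut_key_str word key → Spec_get_shortcut_key_str word key (get_shortcut_key_str word key)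

-- ===== LEMMAS AND PROOFS =====
-- A's fold from any accumulator equals: B's right-scan result if there is a match,
-- otherwise the accumulator followed by the word.
theorem pv_fold_eq_altGo (key : List Char) (l acc : List Char) :
    l.foldl (fun acc c => if pvLowEq c key then '(' :: c :: [')'] else acc ++ [c]) acc
      = (match pvAltGo key l with | some s => s | none => acc ++ l) := by
  induction l generalizing acc with
  | nil => simp [pvAltGo]
  | cons c rest ih =>
    simp only [List.foldl_cons, pvAltGo, ih]
    cases h : pvAltGo key rest with
    | some s => simp
    | none =>
      by_cases hc : pvLowEq c key = true <;> simp [hc]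

-- ===== VERDICT (by name: the statement is the Claim_ definition above) =====
theorem get_shortcut_key_str_spec : Claim_equal_get_shortcut_key_str := by
  intro word key _
  unfold Spec_get_shortcut_key_str get_shortcut_key_str get_shortcut_key_str_alt
  rw [pv_fold_eq_altGo]
  cases h : pvAltGo key.toList word.toList with
  | some s => simp
  | none => simp [String.mk]
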